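-- pv_equiv track=rewrite | github.com/Fanelemenzi/Carfinity | insurance_app/report_generator.py | _determine_section_severity
-- ===== SOURCE A (Python) =====
-- def _determine_section_severity(section_data):
--     """Determine overall severity for a section based on individual components"""
--     if not section_data:
--         return 'none'
--
--     severity_levels = {
--         'none': 0, 'good': 0, 'excellent': 0, 'working': 0, 'intact': 0,
--         'light': 1, 'minor': 2, 'minor_damage': 2, 'fair': 3,
--         'moderate': 4, 'moderate_damage': 4, 'intermittent': 3,
--         'poor': 5, 'severe': 6, 'severe_damage': 6, 'major': 7,
--         'destroyed': 8, 'failed': 7, 'not_working': 6,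
--         'compromised': 8, 'deployed': 9, 'fault': 5
--     }
--
--     max_severity = 0
--     for item in section_data:
--         condition = item.get('condition', 'none')
--         severity_score = severity_levels.get(condition, 0)
--         max_severity = max(max_severity, severity_score)
--
--     # Convert back to severity names
--     if max_severity == 0:
--         return 'none'
--     elif max_severity <= 2:
--         return 'minor'
--     elif max_severity <= 4:
--         return 'moderate'
--     elif max_severity <= 6:
--         return 'major'
--     else:
--         return 'severe'
-- ===== SOURCE B (Python) =====
-- # Tier sets of condition names (derived from the scoring table: >=7, 5-6, 3-4, 1-2)
-- SEVERE = {'major', 'destroyed', 'failed', 'compromised', 'deployed'}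
-- MAJOR = {'poor', 'severe', 'severe_damage', 'not_working', 'fault'}
-- MODERATE = {'fair', 'moderate', 'moderate_damage', 'intermittent'}
-- MINOR = {'light', 'minor', 'minor_damage'}
--
--
-- def _determine_section_severity(section_data):
--     if not section_data:
--         return 'none'
--     present = {item.get('condition', 'none') for item in section_data}
--     if present & SEVERE:
--         return 'severe'
--     if present & MAJOR:
--         return 'major'
--     if present & MODERATE:
--         return 'moderate'
--     if present & MINOR:
--         return 'minor'
--     return 'none'
-- ===== Notes on version B (the rewrite author's own statement) =====
-- stated objective: alternative
-- what changed: Replaces the numeric score dictionary, the running-max fold and the range bucketing with a set of present conditions probed against four precomputed tier sets from highest to lowest.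
import Mathlib
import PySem

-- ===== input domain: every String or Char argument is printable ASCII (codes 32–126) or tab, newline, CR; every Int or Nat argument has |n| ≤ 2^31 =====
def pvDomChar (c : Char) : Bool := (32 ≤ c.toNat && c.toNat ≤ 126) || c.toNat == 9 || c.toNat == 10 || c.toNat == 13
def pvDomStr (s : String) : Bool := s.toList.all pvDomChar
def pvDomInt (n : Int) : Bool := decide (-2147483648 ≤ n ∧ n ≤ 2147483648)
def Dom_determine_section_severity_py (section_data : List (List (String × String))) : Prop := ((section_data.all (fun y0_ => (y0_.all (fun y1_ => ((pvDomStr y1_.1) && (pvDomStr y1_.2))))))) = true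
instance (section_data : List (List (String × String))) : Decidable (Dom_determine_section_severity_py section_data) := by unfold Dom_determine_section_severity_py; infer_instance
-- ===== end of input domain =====

-- B replaces the score dictionary + running max + range bucketing with ordered probes of
-- four precomputed tier sets against the set of present conditions (alternative decomposition).

-- item.get('condition', 'none') — identical in both Pythons
def pvCond (item : List (String × String)) : String :=
  PySem.Dict.getD (PySem.Dict.mk item) "condition" "none"

-- ===== PORT A =====
def pvSeverityLevels : PySem.Dict String Int := PySem.Dict.mk
  [("none", 0), ("good", 0), ("excellent", 0), ("working", 0), ("intact", 0),
   ("light", 1), ("minor", 2), ("minor_damage", 2), ("fair", 3),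
   ("moderate", 4), ("moderate_damage", 4), ("intermittent", 3),
   ("poor", 5), ("severe", 6), ("severe_damage", 6), ("major", 7),
   ("destroyed", 8), ("failed", 7), ("not_working", 6),
   ("compromised", 8), ("deployed", 9), ("fault", 5)]

def determine_section_severity_py (section_data : List (List (String × String))) : String :=
  if section_data = [] then "none"
  else
    let max_severity : Int := section_data.foldl
      (fun m item =>
        let condition := pvCond item
        let severity_score := PySem.Dict.getD pvSeverityLevels condition 0
        max m severity_score) 0
    if max_severity = 0 then "none"
    else if max_severity ≤ 2 then "minor"
    else if max_severity ≤ 4 then "moderate"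
    else if max_severity ≤ 6 then "major"
    else "severe"

-- ===== PORT B =====
def pvSEVERE : PySem.Set String := PySem.Set.ofList ["major", "destroyed", "failed", "compromised", "deployed"]
def pvMAJOR : PySem.Set String := PySem.Set.ofList ["poor", "severe", "severe_damage", "not_working", "fault"]
def pvMODERATE : PySem.Set String := PySem.Set.ofList ["fair", "moderate", "moderate_damage", "intermittent"]
def pvMINOR : PySem.Set String := PySem.Set.ofList ["light", "minor", "minor_damage"]

def determine_section_severity_py_alt (section_data : List (List (String × String))) : String :=
  if section_data = [] then "none"
  else
    let present : PySem.Set String := PySem.Set.ofList (section_data.map pvCond)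
    if PySem.Set.inter present pvSEVERE ≠ [] then "severe"
    else if PySem.Set.inter present pvMAJOR ≠ [] then "major"
    else if PySem.Set.inter present pvMODERATE ≠ [] then "moderate"
    else if PySem.Set.inter present pvMINOR ≠ [] then "minor"
    else "none"

-- ===== PRECONDITION & SPEC =====
def Spec_determine_section_severity_py (section_data : List (List (String × String))) (out : String) : Prop := out = determine_section_severity_py_alt section_data
instance (section_data : List (List (String × String))) (out : String) : Decidable (Spec_determine_section_severity_py section_data out) := by unfold Spec_determine_section_severity_py; infer_instance

-- ===== CLAIM (what is proved, stated in full; the proofs are below) =====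
def Claim_equal_determine_section_severity_py : Prop := ∀ (section_data : List (List (String × String))), Dom_determine_section_severity_py section_data → Spec_determine_section_severity_py section_data (determine_section_severity_py section_data)

-- ===== LEMMAS AND PROOFS =====

-- the score A assigns to a condition string
def pvScore (c : String) : Int := PySem.Dict.getD pvSeverityLevels c 0

theorem pv_fold_max_ge (f : String → Int) :
    ∀ (l : List String) (acc k : Int),
      (k ≤ l.foldl (fun m c => max m (f c)) acc) ↔ (k ≤ acc ∨ ∃ c ∈ l, k ≤ f c) := by
  intro l
  induction l with
  | nil => simp
  | cons x xs ih =>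
    intro acc k
    simp only [List.foldl_cons, ih, le_max_iff, List.mem_cons]
    constructor
    · rintro ((h | h) | ⟨c, hc, hkc⟩)
      · exact Or.inl h
      · exact Or.inr ⟨x, Or.inl rfl, h⟩
      · exact Or.inr ⟨c, Or.inr hc, hkc⟩
    · rintro (h | ⟨c, (rfl | hc), hkc⟩)
      · exact Or.inl (Or.inl h)
      · exact Or.inl (Or.inr hkc)
      · exact Or.inr ⟨c, hc, hkc⟩

theorem pv_inter_ne_nil (l : List String) (t : PySem.Set String) :
    (PySem.Set.inter (PySem.Set.ofList l) t ≠ []) ↔ ∃ c ∈ l, t.contains c = true := by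
  rw [Ne, List.eq_nil_iff_forall_not_mem]
  simp only [not_forall, not_not]
  constructor
  · rintro ⟨c, hc⟩
    rw [PySem.Set.inter, List.mem_filter, PySem.Set.mem_ofList] at hc
    exact ⟨c, hc.1, hc.2⟩
  · rintro ⟨c, hcl, hct⟩
    exact ⟨c, by rw [PySem.Set.inter, List.mem_filter, PySem.Set.mem_ofList]; exact ⟨hcl, hct⟩⟩

theorem pv_tier (c : String) :
    (pvSEVERE.contains c = true ↔ 7 ≤ pvScore c) ∧
    (pvMAJOR.contains c = true ↔ (5 ≤ pvScore c ∧ pvScore c ≤ 6)) ∧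
    (pvMODERATE.contains c = true ↔ (3 ≤ pvScore c ∧ pvScore c ≤ 4)) ∧
    (pvMINOR.contains c = true ↔ (1 ≤ pvScore c ∧ pvScore c ≤ 2)) := by
  by_cases h0 : c = "none"
  · subst h0; decide
  by_cases h1 : c = "good"
  · subst h1; decide
  by_cases h2 : c = "excellent"
  · subst h2; decide
  by_cases h3 : c = "working"
  · subst h3; decide
  by_cases h4 : c = "intact"
  · subst h4; decide
  by_cases h5 : c = "light"
  · subst h5; decide
  by_cases h6 : c = "minor"
  · subst h6; decide
  by_cases h7 : c = "minor_damage"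
  · subst h7; decide
  by_cases h8 : c = "fair"
  · subst h8; decide
  by_cases h9 : c = "moderate"
  · subst h9; decide
  by_cases h10 : c = "moderate_damage"
  · subst h10; decide
  by_cases h11 : c = "intermittent"
  · subst h11; decide
  by_cases h12 : c = "poor"
  · subst h12; decide
  by_cases h13 : c = "severe"
  · subst h13; decide
  by_cases h14 : c = "severe_damage"
  · subst h14; decide
  by_cases h15 : c = "major"
  · subst h15; decide
  by_cases h16 : c = "destroyed"
  · subst h16; decide
  by_cases h17 : c = "failed"
  · subst h17; decide
  by_cases h18 : c = "not_working"
  · subst h18; decide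
  by_cases h19 : c = "compromised"
  · subst h19; decide
  by_cases h20 : c = "deployed"
  · subst h20; decide
  by_cases h21 : c = "fault"
  · subst h21; decide
  have hS : pvSEVERE = ["major", "destroyed", "failed", "compromised", "deployed"] := by decide
  have hMa : pvMAJOR = ["poor", "severe", "severe_damage", "not_working", "fault"] := by decide
  have hMo : pvMODERATE = ["fair", "moderate", "moderate_damage", "intermittent"] := by decide
  have hMi : pvMINOR = ["light", "minor", "minor_damage"] := by decide
  simp [hS, hMa, hMo, hMi, PySem.Set.contains, pvScore, pvSeverityLevels,
    PySem.Dict.getD, PySem.Dict.get?,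
    h0, h1, h2, h3, h4, h5, h6, h7, h8, h9, h10, h11, h12, h13, h14, h15, h16, h17, h18, h19, h20, h21, Ne.symm h0, Ne.symm h1, Ne.symm h2, Ne.symm h3, Ne.symm h4, Ne.symm h5, Ne.symm h6, Ne.symm h7, Ne.symm h8, Ne.symm h9, Ne.symm h10, Ne.symm h11, Ne.symm h12, Ne.symm h13, Ne.symm h14, Ne.symm h15, Ne.symm h16, Ne.symm h17, Ne.symm h18, Ne.symm h19, Ne.symm h20, Ne.symm h21]

theorem pv_severe_iff (c : String) : pvSEVERE.contains c = true ↔ 7 ≤ pvScore c := (pv_tier c).1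
theorem pv_major_iff (c : String) : pvMAJOR.contains c = true ↔ (5 ≤ pvScore c ∧ pvScore c ≤ 6) := (pv_tier c).2.1
theorem pv_moderate_iff (c : String) : pvMODERATE.contains c = true ↔ (3 ≤ pvScore c ∧ pvScore c ≤ 4) := (pv_tier c).2.2.1
theorem pv_minor_iff (c : String) : pvMINOR.contains c = true ↔ (1 ≤ pvScore c ∧ pvScore c ≤ 2) := (pv_tier c).2.2.2

-- ===== VERDICT (by name: the statement is the Claim_ definition above) =====
theorem determine_section_severity_py_spec : Claim_equal_determine_section_severity_py := by
  intro sd _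
  unfold Spec_determine_section_severity_py determine_section_severity_py determine_section_severity_py_alt
  by_cases hnil : sd = []
  · simp [hnil]
  · simp only [if_neg hnil]
    have hfold : sd.foldl
        (fun m item =>
          let condition := pvCond item
          let severity_score := PySem.Dict.getD pvSeverityLevels condition 0
          max m severity_score) 0
        = (sd.map pvCond).foldl (fun m c => max m (pvScore c)) 0 := by
      rw [List.foldl_map]; rfl
    rw [hfold]
    set L := sd.map pvCond with hL
    set M := L.foldl (fun m c => max m (pvScore c)) 0 with hM
    have hmax : ∀ k : Int, (k ≤ M) ↔ (k ≤ 0 ∨ ∃ c ∈ L, k ≤ pvScore c) := fun k =>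
      pv_fold_max_ge pvScore L 0 k
    by_cases h7 : ∃ c ∈ L, 7 ≤ pvScore c
    · have hM7 : 7 ≤ M := (hmax 7).2 (Or.inr h7)
      rw [if_pos ((pv_inter_ne_nil L pvSEVERE).2 (by
        obtain ⟨c, hc, hs⟩ := h7; exact ⟨c, hc, (pv_severe_iff c).2 hs⟩))]
      rw [if_neg (by omega), if_neg (by omega), if_neg (by omega), if_neg (by omega)]
    · have hS : ¬ PySem.Set.inter (PySem.Set.ofList L) pvSEVERE ≠ [] := by
        rw [pv_inter_ne_nil]
        rintro ⟨c, hc, hs⟩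
        exact h7 ⟨c, hc, (pv_severe_iff c).1 hs⟩
      have hM6 : M ≤ 6 := by
        by_contra h
        rcases (hmax 7).1 (by omega) with h0 | hex
        · omega
        · exact h7 hex
      rw [if_neg hS]
      by_cases h5 : ∃ c ∈ L, 5 ≤ pvScore c
      · have hM5 : 5 ≤ M := (hmax 5).2 (Or.inr h5)
        rw [if_pos ((pv_inter_ne_nil L pvMAJOR).2 (by
          obtain ⟨c, hc, hs⟩ := h5
          refine ⟨c, hc, (pv_major_iff c).2 ⟨hs, ?_⟩⟩
          by_contra h; exact h7 ⟨c, hc, by omega⟩))]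
        rw [if_neg (by omega), if_neg (by omega), if_neg (by omega), if_pos (by omega)]
      · have hMaj : ¬ PySem.Set.inter (PySem.Set.ofList L) pvMAJOR ≠ [] := by
          rw [pv_inter_ne_nil]
          rintro ⟨c, hc, hs⟩
          exact h5 ⟨c, hc, ((pv_major_iff c).1 hs).1⟩
        have hM4 : M ≤ 4 := by
          by_contra h
          rcases (hmax 5).1 (by omega) with h0 | hex
          · omega
          · exact h5 hex
        rw [if_neg hMaj]
        by_cases h3 : ∃ c ∈ L, 3 ≤ pvScore c
        · have hM3 : 3 ≤ M := (hmax 3).2 (Or.inr h3)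
          rw [if_pos ((pv_inter_ne_nil L pvMODERATE).2 (by
            obtain ⟨c, hc, hs⟩ := h3
            refine ⟨c, hc, (pv_moderate_iff c).2 ⟨hs, ?_⟩⟩
            by_contra h; exact h5 ⟨c, hc, by omega⟩))]
          rw [if_neg (by omega), if_neg (by omega), if_pos (by omega)]
        · have hMod : ¬ PySem.Set.inter (PySem.Set.ofList L) pvMODERATE ≠ [] := by
            rw [pv_inter_ne_nil]
            rintro ⟨c, hc, hs⟩
            exact h3 ⟨c, hc, ((pv_moderate_iff c).1 hs).1⟩
          have hM2 : M ≤ 2 := by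
            by_contra h
            rcases (hmax 3).1 (by omega) with h0 | hex
            · omega
            · exact h3 hex
          rw [if_neg hMod]
          by_cases h1 : ∃ c ∈ L, 1 ≤ pvScore c
          · have hM1 : 1 ≤ M := (hmax 1).2 (Or.inr h1)
            rw [if_pos ((pv_inter_ne_nil L pvMINOR).2 (by
              obtain ⟨c, hc, hs⟩ := h1
              refine ⟨c, hc, (pv_minor_iff c).2 ⟨hs, ?_⟩⟩
              by_contra h; exact h3 ⟨c, hc, by omega⟩))]
            rw [if_neg (by omega), if_pos (by omega)]
          · have hMin : ¬ PySem.Set.inter (PySem.Set.ofList L) pvMINOR ≠ [] := by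
              rw [pv_inter_ne_nil]
              rintro ⟨c, hc, hs⟩
              exact h1 ⟨c, hc, ((pv_minor_iff c).1 hs).1⟩
            have hM0 : M ≤ 0 := by
              by_contra h
              rcases (hmax 1).1 (by omega) with h0 | hex
              · omega
              · exact h1 hex
            have hM0' : 0 ≤ M := (hmax 0).2 (Or.inl le_rfl)
            rw [if_neg hMin, if_pos (by omega)]
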